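-- pv_equiv track=rewrite | github.com/Nasmy/nas-sam-docu | functions/layers/text/bbox_utils.py | parent_bounding_box
-- ===== SOURCE A (Python) =====
-- def parent_bounding_box(bounding_box_list):
--     """
--     Get the parent bounding box from a list of bounding boxes
--     @param bounding_box_list:
--     @return:
--     """
--     x1, y1, x2, y2 = bounding_box_list[0]
--     for _bounding_box in bounding_box_list:
--         x1 = min(x1, _bounding_box[0])
--         y1 = min(y1, _bounding_box[1])
--         x2 = max(x2, _bounding_box[2])
--         y2 = max(y2, _bounding_box[3])
--     return [x1, y1, x2, y2]
-- ===== SOURCE B (Python) =====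
-- def parent_bounding_box(bounding_box_list):
--     """Column-wise bounding box: transpose and take min/min/max/max per column."""
--     first = bounding_box_list[0]  # IndexError on empty, like the original
--     cols = list(zip(*bounding_box_list))
--     return [min(cols[0]), min(cols[1]), max(cols[2]), max(cols[3])]
-- ===== Notes on version B (the rewrite author's own statement) =====
-- stated objective: simpler
-- what changed: Replaced the row-wise four-accumulator loop by a transpose (zip(*boxes)) followed by four independent built-in min/max column reductions.
import Mathlib
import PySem

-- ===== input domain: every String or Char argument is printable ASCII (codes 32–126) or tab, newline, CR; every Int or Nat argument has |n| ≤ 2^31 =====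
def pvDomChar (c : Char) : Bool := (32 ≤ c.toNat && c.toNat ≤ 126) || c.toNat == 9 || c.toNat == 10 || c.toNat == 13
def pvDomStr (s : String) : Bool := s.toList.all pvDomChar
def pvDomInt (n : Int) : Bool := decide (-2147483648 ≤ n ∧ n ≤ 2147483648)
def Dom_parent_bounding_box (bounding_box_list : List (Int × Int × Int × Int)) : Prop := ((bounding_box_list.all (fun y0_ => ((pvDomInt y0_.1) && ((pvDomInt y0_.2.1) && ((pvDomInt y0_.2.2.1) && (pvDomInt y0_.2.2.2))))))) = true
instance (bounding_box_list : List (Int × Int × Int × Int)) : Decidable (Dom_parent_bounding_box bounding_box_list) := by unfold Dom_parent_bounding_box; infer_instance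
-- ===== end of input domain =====

-- B replaces A's row-wise four-accumulator loop by a transpose and four independent min/max column reductions (simpler decomposition).


-- ===== PORT A =====
-- Literal port of A: unpack the first box, then one loop updating the four accumulators.
def parent_bounding_box (bounding_box_list : List (Int × Int × Int × Int)) : List Int :=
  match bounding_box_list with
  | [] => []  -- Python raises IndexError here; excluded by Pre_
  | (x1, y1, x2, y2) :: _ =>
    let s := bounding_box_list.foldl
      (fun (s : Int × Int × Int × Int) bb =>
        (min s.1 bb.1, min s.2.1 bb.2.1, max s.2.2.1 bb.2.2.1, max s.2.2.2 bb.2.2.2))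
      (x1, y1, x2, y2)
    [s.1, s.2.1, s.2.2.1, s.2.2.2]

-- ===== PORT B =====
-- Literal port of B: transpose into four column lists, then min/min/max/max of each.
def parent_bounding_box_alt (bounding_box_list : List (Int × Int × Int × Int)) : List Int :=
  match bounding_box_list with
  | [] => []  -- Python raises IndexError here; excluded by Pre_
  | first :: _ =>
    let col0 := bounding_box_list.map (·.1)
    let col1 := bounding_box_list.map (·.2.1)
    let col2 := bounding_box_list.map (·.2.2.1)
    let col3 := bounding_box_list.map (·.2.2.2)
    [(PySem.List.min? col0 (fun y => y)).getD first.1,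
     (PySem.List.min? col1 (fun y => y)).getD first.2.1,
     (PySem.List.max? col2 (fun y => y)).getD first.2.2.1,
     (PySem.List.max? col3 (fun y => y)).getD first.2.2.2]

-- ===== PRECONDITION & SPEC =====
-- Pre_ excludes only the empty list, on which both Pythons raise IndexError.
def Pre_parent_bounding_box (bounding_box_list : List (Int × Int × Int × Int)) : Prop := bounding_box_list ≠ []
instance (bounding_box_list : List (Int × Int × Int × Int)) : Decidable (Pre_parent_bounding_box bounding_box_list) := by unfold Pre_parent_bounding_box; infer_instance
def pvWitness_parent_bounding_box : (List (Int × Int × Int × Int)) := [(1, 2, 3, 4), (0, 5, 7, 2)]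

def Spec_parent_bounding_box (bounding_box_list : List (Int × Int × Int × Int)) (out : List Int) : Prop := out = parent_bounding_box_alt bounding_box_list
instance (bounding_box_list : List (Int × Int × Int × Int)) (out : List Int) : Decidable (Spec_parent_bounding_box bounding_box_list out) := by unfold Spec_parent_bounding_box; infer_instance

-- ===== CLAIM (what is proved, stated in full; the proofs are below) =====
def Claim_equal_parent_bounding_box : Prop := ∀ (bounding_box_list : List (Int × Int × Int × Int)), Dom_parent_bounding_box bounding_box_list → Pre_parent_bounding_box bounding_box_list → Spec_parent_bounding_box bounding_box_list (parent_bounding_box bounding_box_list)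

-- ===== LEMMAS AND PROOFS =====

-- A's tuple-state fold is the tuple of the four componentwise folds.
theorem foldl_minmax_components (l : List (Int × Int × Int × Int)) (a b c d : Int) :
    l.foldl (fun (s : Int × Int × Int × Int) bb =>
        (min s.1 bb.1, min s.2.1 bb.2.1, max s.2.2.1 bb.2.2.1, max s.2.2.2 bb.2.2.2)) (a, b, c, d)
      = ((l.map (·.1)).foldl min a, (l.map (·.2.1)).foldl min b,
         (l.map (·.2.2.1)).foldl max c, (l.map (·.2.2.2)).foldl max d) := by
  induction l generalizing a b c d with
  | nil => rfl
  | cons x t ih => simp [List.foldl, ih]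

-- ===== VERDICT (by name: the statement is the Claim_ definition above) =====
theorem parent_bounding_box_spec : Claim_equal_parent_bounding_box := by
  intro l _ hpre
  unfold Spec_parent_bounding_box parent_bounding_box parent_bounding_box_alt
  match l with
  | [] => exact absurd rfl hpre
  | (x1, y1, x2, y2) :: t =>
    simp only [foldl_minmax_components, List.map_cons, List.foldl_cons,
      PySem.List.min?_id_cons, PySem.List.max?_id_cons, Option.getD_some]
    simp [min_self, max_self]
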